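-- pv_equiv track=rewrite | github.com/KevalSThanki/ml | ml/1.py | learn
-- ===== SOURCE A (Python) =====
-- def learn(concepts,target):
--     specific_h=concepts[0].copy()
--     for i,h in enumerate(concepts):
--         if target[i]=="yes":
--             for x in range(len(specific_h)):
--                 if h[x]!=specific_h[x]:
--                     specific_h[x]="?"
--     return specific_h
-- ===== SOURCE B (Python) =====
-- def learn(concepts, target):
--     # Transpose-and-set approach: gather the first row plus the positive examples,
--     # transpose with zip(*rows), and emit each column's sole value or "?" when the
--     # column's value-set has more than one element.
--     rows = [concepts[0]] + [h for h, t in zip(concepts, target) if t == "yes"]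
--     return [col[0] if len(set(col)) == 1 else "?" for col in zip(*rows)]
-- ===== Notes on version B (the rewrite author's own statement) =====
-- stated objective: alternative
-- what changed: A mutates a running hypothesis row-by-row comparing each positive example against it; B collects the first row plus the positive rows, transposes them with zip(*rows), and decides each attribute by the cardinality of the column's value-set (set())
import Mathlib
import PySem

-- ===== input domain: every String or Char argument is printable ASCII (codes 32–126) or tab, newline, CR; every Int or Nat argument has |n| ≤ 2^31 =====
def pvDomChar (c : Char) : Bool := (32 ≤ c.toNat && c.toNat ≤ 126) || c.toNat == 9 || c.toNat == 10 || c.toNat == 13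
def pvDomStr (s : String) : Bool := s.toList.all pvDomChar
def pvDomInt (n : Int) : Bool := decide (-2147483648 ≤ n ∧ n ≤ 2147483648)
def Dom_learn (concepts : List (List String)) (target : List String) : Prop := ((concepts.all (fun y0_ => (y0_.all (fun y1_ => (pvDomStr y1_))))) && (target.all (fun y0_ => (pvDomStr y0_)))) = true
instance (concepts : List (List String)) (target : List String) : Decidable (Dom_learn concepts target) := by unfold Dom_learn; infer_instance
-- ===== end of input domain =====

-- B computes the Find-S hypothesis by transposing [first row] + positive rows and testing each
-- column's value-set cardinality, instead of A's row-by-row in-place marking (objective: alternative).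

-- ===== PORT A =====
-- inner 'for x in range(len(specific_h)): if h[x]!=specific_h[x]: specific_h[x]="?"'
def learnRowA (s h : List String) : List String :=
  (PySem.List.pyRange 0 s.length 1).foldl
    (fun t x =>
      if PySem.List.pyGetD h x "" ≠ PySem.List.pyGetD t x "" then PySem.List.pySetD t x "?" else t)
    s

def learn (concepts : List (List String)) (target : List String) : List String :=
  -- specific_h = concepts[0].copy(); out-of-range indexing is excluded by Pre_learn (Python raises there)
  (PySem.List.enumerate concepts).foldl
    (fun s p => if PySem.List.pyGetD target p.1 "" = "yes" then learnRowA s p.2 else s)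
    (PySem.List.pyGetD concepts 0 [])

-- ===== PORT B =====
-- zip(*rows): columns up to the shortest row (port of the built-in's contract)
def zipStarLen (rows : List (List String)) : Nat :=
  match rows.map List.length with
  | [] => 0
  | n :: ns => ns.foldl min n

def zipStar (rows : List (List String)) : List (List String) :=
  (List.range (zipStarLen rows)).map (fun j => rows.map (fun h => h.getD j ""))

def learn_alt (concepts : List (List String)) (target : List String) : List String :=
  (zipStar (PySem.List.pyGetD concepts 0 [] ::
      ((concepts.zip target).filter (fun p => p.2 == "yes")).map Prod.fst)).map
    (fun col => if (PySem.Set.ofList col).length == 1 then col.getD 0 "" else "?")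

-- ===== PRECONDITION & SPEC =====
-- Pre_learn excludes exactly the inputs where the Python A raises IndexError: empty concepts
-- (concepts[0]), target shorter than concepts (target[i]), or a positive row shorter than row 0 (h[x]).
def Pre_learn (concepts : List (List String)) (target : List String) : Prop :=
  concepts ≠ [] ∧ concepts.length ≤ target.length ∧
  ∀ i : Nat, i < concepts.length → target.getD i "" = "yes" →
    (concepts.getD 0 []).length ≤ (concepts.getD i []).length

instance (concepts : List (List String)) (target : List String) : Decidable (Pre_learn concepts target) := by
  unfold Pre_learn; infer_instance

def pvWitness_learn : List (List String) × List String :=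
  ([["sunny", "warm"], ["sunny", "cold"]], ["yes", "yes"])

def Spec_learn (concepts : List (List String)) (target : List String) (out : List String) : Prop := out = learn_alt concepts target
instance (concepts : List (List String)) (target : List String) (out : List String) : Decidable (Spec_learn concepts target out) := by unfold Spec_learn; infer_instance

-- ===== CLAIM (what is proved, stated in full; the proofs are below) =====
def Claim_equal_learn : Prop := ∀ (concepts : List (List String)) (target : List String), Dom_learn concepts target → Pre_learn concepts target → Spec_learn concepts target (learn concepts target)

-- ===== LEMMAS AND PROOFS =====

-- the value of attribute j determined by the positive rows `ys`, starting from row `c0`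
def colVal (c0 : List String) (ys : List (List String)) (j : Nat) : String :=
  if ys.any (fun h => PySem.List.pyGetD h (j : Int) "" != c0.getD j "")
  then "?" else c0.getD j ""

lemma map_range_getD (l : List String) :
    (List.range l.length).map (fun j => l.getD j "") = l := by
  apply List.ext_getElem
  · simp
  · intro i h1 h2
    simp [List.getD_eq_getElem?_getD, List.getElem?_eq_getElem h2]

lemma learnRow_prefix (h s : List String) (m : Nat) (hm : m ≤ s.length) :
    (PySem.List.pyRange 0 (m : Int) 1).foldl
      (fun t x =>
        if PySem.List.pyGetD h x "" ≠ PySem.List.pyGetD t x "" then PySem.List.pySetD t x "?" else t)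
      s
    = (List.range m).map
        (fun (j : Nat) => if PySem.List.pyGetD h (j : Int) "" ≠ s.getD j "" then "?" else s.getD j "")
      ++ s.drop m := by
  induction m with
  | zero =>
    rw [Nat.cast_zero, PySem.List.pyRange_one_eq_nil le_rfl]
    simp
  | succ m ih =>
    have hm' : m < s.length := hm
    have hsplit : PySem.List.pyRange 0 ((m + 1 : Nat) : Int) 1
        = PySem.List.pyRange 0 (m : Int) 1 ++ [(m : Int)] := by
      push_cast
      exact PySem.List.pyRange_one_succ_right (by positivity)
    rw [hsplit, List.foldl_append, ih (Nat.le_of_lt hm')]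
    set pre := (List.range m).map
        (fun (j : Nat) => if PySem.List.pyGetD h (j : Int) "" ≠ s.getD j "" then "?" else s.getD j "") with hpre
    have hlenpre : pre.length = m := by simp [hpre]
    have hdrop : s.drop m = s[m] :: s.drop (m + 1) := List.drop_eq_getElem_cons hm'
    have hget : PySem.List.pyGetD (pre ++ s.drop m) (m : Int) "" = s[m] := by
      rw [PySem.List.pyGetD_natCast, List.getD_eq_getElem?_getD,
        List.getElem?_append_right (by omega), hlenpre, Nat.sub_self, hdrop]
      simp only [List.getElem?_cons_zero, Option.getD_some]
    have hset : PySem.List.pySetD (pre ++ s.drop m) (m : Int) "?"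
        = pre ++ ("?" :: s.drop (m + 1)) := by
      rw [PySem.List.pySetD_natCast, List.set_append, if_neg (by omega), hlenpre,
        Nat.sub_self, hdrop]
      rfl
    have hsm : s.getD m "" = s[m] := by
      rw [List.getD_eq_getElem?_getD, List.getElem?_eq_getElem hm']; rfl
    have hgoal : (List.range (m + 1)).map
        (fun (j : Nat) => if PySem.List.pyGetD h (j : Int) "" ≠ s.getD j "" then "?" else s.getD j "")
        ++ s.drop (m + 1)
        = pre ++ ((if PySem.List.pyGetD h (m : Int) "" ≠ s.getD m "" then "?" else s.getD m "")
            :: s.drop (m + 1)) := by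
      rw [List.range_succ]
      simp [hpre]
    simp only [List.foldl_cons, List.foldl_nil, hget, hgoal]
    by_cases hc : PySem.List.pyGetD h (m : Int) "" ≠ s[m]
    · rw [if_pos hc, hset, if_pos (by rw [hsm]; exact hc)]
    · rw [if_neg hc, if_neg (by rw [hsm]; exact hc), hsm, hdrop]

lemma learnRowA_eq (s h : List String) :
    learnRowA s h
    = (List.range s.length).map
        (fun (j : Nat) => if PySem.List.pyGetD h (j : Int) "" ≠ s.getD j "" then "?" else s.getD j "") := by
  have := learnRow_prefix h s s.length le_rfl
  simpa [learnRowA] using this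

lemma colVal_snoc (c0 : List String) (acc : List (List String)) (h : List String) (j : Nat) :
    (if PySem.List.pyGetD h (j : Int) "" ≠ colVal c0 acc j then "?" else colVal c0 acc j)
    = colVal c0 (acc ++ [h]) j := by
  unfold colVal
  by_cases hb : (acc.any fun g => PySem.List.pyGetD g (j : Int) "" != c0.getD j "") = true
  · simp only [hb, List.any_append, Bool.true_or, if_true]
    exact ite_self "?"
  · simp only [Bool.not_eq_true] at hb
    simp only [hb, List.any_append, Bool.false_or, Bool.false_eq_true, if_false,
      List.any_cons, List.any_nil, Bool.or_false]
    by_cases hd : PySem.List.pyGetD h (j : Int) "" = c0.getD j ""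
    · simp [hd]
    · simp only [bne_iff_ne, ne_eq, hd, not_false_eq_true, if_true]

lemma outer_fold (concepts : List (List String)) (target : List String)
    (idx : List Int) (acc : List (List String)) :
    idx.foldl
      (fun s j => if PySem.List.pyGetD target j "" = "yes"
        then learnRowA s (PySem.List.pyGetD concepts j []) else s)
      ((List.range (PySem.List.pyGetD concepts 0 []).length).map
        (colVal (PySem.List.pyGetD concepts 0 []) acc))
    = (List.range (PySem.List.pyGetD concepts 0 []).length).map
        (colVal (PySem.List.pyGetD concepts 0 [])
          (acc ++ (idx.filter (fun j => PySem.List.pyGetD target j "" == "yes")).map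
            (fun j => PySem.List.pyGetD concepts j []))) := by
  induction idx generalizing acc with
  | nil => simp
  | cons j rest ih =>
    by_cases hy : PySem.List.pyGetD target j "" = "yes"
    · have hstep : learnRowA
          ((List.range (PySem.List.pyGetD concepts 0 []).length).map
            (colVal (PySem.List.pyGetD concepts 0 []) acc))
          (PySem.List.pyGetD concepts j [])
          = (List.range (PySem.List.pyGetD concepts 0 []).length).map
            (colVal (PySem.List.pyGetD concepts 0 [])
              (acc ++ [PySem.List.pyGetD concepts j []])) := by
        rw [learnRowA_eq]
        simp only [List.length_map, List.length_range]
        apply List.map_congr_left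
        intro k hk
        rw [List.mem_range] at hk
        have hgd : ((List.range (PySem.List.pyGetD concepts 0 []).length).map
            (colVal (PySem.List.pyGetD concepts 0 []) acc)).getD k ""
            = colVal (PySem.List.pyGetD concepts 0 []) acc k := by
          rw [List.getD_eq_getElem?_getD, List.getElem?_map, List.getElem?_range hk]
          rfl
        rw [hgd, colVal_snoc]
      simp only [List.foldl_cons, if_pos hy, hstep, ih]
      simp [hy]
    · simp only [List.foldl_cons, if_neg hy, ih]
      have hby : (PySem.List.pyGetD target j "" == "yes") = false := by simpa using hy
      simp [hby]

lemma learn_eq_map (concepts : List (List String)) (target : List String) :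
    learn concepts target
    = (List.range (PySem.List.pyGetD concepts 0 []).length).map
        (colVal (PySem.List.pyGetD concepts 0 [])
          (((PySem.List.pyRange 0 concepts.length 1).filter
              (fun j => PySem.List.pyGetD target j "" == "yes")).map
            (fun j => PySem.List.pyGetD concepts j []))) := by
  unfold learn
  rw [PySem.List.enumerate_eq_map_pyRange (d := ([] : List String)), List.foldl_map]
  have hinit : (List.range (PySem.List.pyGetD concepts 0 []).length).map
      (colVal (PySem.List.pyGetD concepts 0 []) [])
      = PySem.List.pyGetD concepts 0 [] := by
    have h1 : ∀ j ∈ List.range (PySem.List.pyGetD concepts 0 []).length,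
        colVal (PySem.List.pyGetD concepts 0 []) [] j
        = (PySem.List.pyGetD concepts 0 []).getD j "" := by
      intro j _; simp [colVal]
    rw [List.map_congr_left h1, map_range_getD]
  conv_lhs => rw [← hinit]
  rw [outer_fold]
  simp

-- B-side: the positive-row list built from zip equals the index-built one
lemma zip_filter_eq (concepts : List (List String)) (target : List String)
    (hlen : concepts.length ≤ target.length) :
    ((concepts.zip target).filter (fun p => p.2 == "yes")).map Prod.fst
    = ((List.range concepts.length).filter (fun j => target.getD j "" == "yes")).map
        (fun j => concepts.getD j []) := by
  induction concepts generalizing target with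
  | nil => simp
  | cons c cs ih =>
    cases target with
    | nil => simp at hlen
    | cons t ts =>
      have hlen' : cs.length ≤ ts.length := by simpa using hlen
      simp only [List.length_cons, List.range_succ_eq_map, List.zip_cons_cons, List.filter_cons,
        List.filter_map, List.getD_cons_zero]
      by_cases ht : (t == "yes") = true <;>
        simp [ht, Function.comp_def, ih ts hlen']

lemma foldl_min_eq (a : Nat) (l : List Nat) (h : ∀ x ∈ l, a ≤ x) : l.foldl min a = a := by
  induction l with
  | nil => rfl
  | cons x xs ih =>
    have : min a x = a := Nat.min_eq_left (h x (List.mem_cons_self))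
    simp only [List.foldl_cons, this]
    exact ih (fun y hy => h y (List.mem_cons_of_mem _ hy))

-- len(set(a :: l)) == 1 iff no element of l differs from a
lemma foldl_add_mem (l : List String) (s : List String) (h : ∀ b ∈ l, b ∈ s) :
    l.foldl PySem.Set.add s = s := by
  induction l with
  | nil => rfl
  | cons b bs ih =>
    have hb : PySem.Set.add s b = s := by
      simp [PySem.Set.add, h b List.mem_cons_self]
    rw [List.foldl_cons, hb]
    exact ih (fun y hy => h y (List.mem_cons_of_mem _ hy))

lemma ofList_all_eq (a : String) (l : List String) (h : ∀ b ∈ l, b = a) :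
    PySem.Set.ofList (a :: l) = [a] := by
  rw [PySem.Set.ofList_eq_foldl, List.foldl_cons]
  exact foldl_add_mem l _ (fun b hb => by simp [PySem.Set.add, h b hb])

lemma setLen_one_iff (a : String) (l : List String) :
    ((PySem.Set.ofList (a :: l)).length == 1) = !(l.any (fun b => b != a)) := by
  by_cases h : (l.any (fun b => b != a)) = true
  · simp only [h, Bool.not_true]
    obtain ⟨b, hbmem, hbne⟩ := List.any_eq_true.mp h
    have hane : b ≠ a := bne_iff_ne.mp hbne
    have hamem : a ∈ PySem.Set.ofList (a :: l) := by
      rw [PySem.Set.mem_ofList]; exact List.mem_cons_self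
    have hbmem' : b ∈ PySem.Set.ofList (a :: l) := by
      rw [PySem.Set.mem_ofList]; exact List.mem_cons_of_mem _ hbmem
    apply beq_eq_false_iff_ne.mpr
    intro hlen
    obtain ⟨x, hx⟩ := List.length_eq_one_iff.mp hlen
    rw [hx] at hamem hbmem'
    exact hane (List.mem_singleton.mp hbmem' ▸ (List.mem_singleton.mp hamem).symm)
  · simp only [Bool.not_eq_true] at h
    have hall : ∀ b ∈ l, b = a := by
      intro b hb
      have := (List.any_eq_false.mp h) b hb
      simpa using this
    rw [ofList_all_eq a l hall]
    simp [h]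

lemma learn_alt_eq_map (concepts : List (List String)) (target : List String)
    (hpre : Pre_learn concepts target) :
    learn_alt concepts target
    = (List.range (PySem.List.pyGetD concepts 0 []).length).map
        (colVal (PySem.List.pyGetD concepts 0 [])
          (((PySem.List.pyRange 0 concepts.length 1).filter
              (fun j => PySem.List.pyGetD target j "" == "yes")).map
            (fun j => PySem.List.pyGetD concepts j []))) := by
  obtain ⟨hne, hlen, hrow⟩ := hpre
  set c0 := PySem.List.pyGetD concepts 0 [] with hc0
  -- identify the two positive-row lists
  have hys : ((concepts.zip target).filter (fun p => p.2 == "yes")).map Prod.fst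
      = ((PySem.List.pyRange 0 concepts.length 1).filter
          (fun j => PySem.List.pyGetD target j "" == "yes")).map
          (fun j => PySem.List.pyGetD concepts j []) := by
    rw [zip_filter_eq concepts target hlen, PySem.List.pyRange_zero_natCast,
      List.filter_map, List.map_map]
    simp [Function.comp_def, PySem.List.pyGetD_natCast]
  set ys := ((PySem.List.pyRange 0 concepts.length 1).filter
      (fun j => PySem.List.pyGetD target j "" == "yes")).map
      (fun j => PySem.List.pyGetD concepts j []) with hysdef
  -- every positive row is at least as long as row 0
  have hyslen : ∀ h ∈ ys, c0.length ≤ h.length := by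
    intro h hh
    rw [hysdef, List.mem_map] at hh
    obtain ⟨j, hjmem, hjeq⟩ := hh
    rw [List.mem_filter, PySem.List.pyRange_zero_natCast, List.mem_map] at hjmem
    obtain ⟨⟨k, hkmem, hkeq⟩, hjy⟩ := hjmem
    rw [List.mem_range] at hkmem
    subst hkeq
    rw [PySem.List.pyGetD_natCast] at hjy hjeq
    have := hrow k hkmem (by simpa using hjy)
    rw [hjeq] at this
    rw [hc0]
    rcases concepts with _ | ⟨c, cs⟩
    · exact absurd rfl hne
    · simpa [PySem.List.pyGetD] using this
  unfold learn_alt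
  rw [hys, ← hc0]
  have hzl : zipStarLen (c0 :: ys) = c0.length := by
    unfold zipStarLen
    simp only [List.map_cons]
    exact foldl_min_eq c0.length (ys.map List.length)
      (by intro x hx; rw [List.mem_map] at hx; obtain ⟨h, hh, rfl⟩ := hx; exact hyslen h hh)
  unfold zipStar
  rw [hzl, List.map_map]
  apply List.map_congr_left
  intro j hj
  rw [List.mem_range] at hj
  simp only [Function.comp_def, List.map_cons]
  have hmapany : (ys.map (fun h => h.getD j "")).any (fun b => b != c0.getD j "")
      = ys.any (fun h => PySem.List.pyGetD h (j : Int) "" != c0.getD j "") := by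
    rw [List.any_map]
    simp only [Function.comp_def, PySem.List.pyGetD_natCast]
  rw [setLen_one_iff, hmapany]
  cases hany : (ys.any fun h => PySem.List.pyGetD h (j : Int) "" != c0.getD j "") <;>
    simp only [colVal, hany, Bool.not_true, Bool.not_false, Bool.false_eq_true, if_false, if_true,
      List.getD_cons_zero]

lemma learn_eq_alt (concepts : List (List String)) (target : List String)
    (hpre : Pre_learn concepts target) :
    learn concepts target = learn_alt concepts target := by
  rw [learn_eq_map, learn_alt_eq_map concepts target hpre]

-- ===== VERDICT (by name: the statement is the Claim_ definition above) =====
theorem learn_spec : Claim_equal_learn := by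
  intro concepts target _ hpre
  unfold Spec_learn
  exact learn_eq_alt concepts target hpre
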